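-- pv_equiv track=rewrite | github.com/suhasgumma/Problem-Solving | codeForces/SolvingLikeAGame/Level5/magicNumbers.py | solve
-- ===== SOURCE A (Python) =====
-- def solve(string):
--     str1 = '144'
--     str2 = '14'
--
--     str3 = '1'
--
--     n = len(string)
--
--     i = 0
--
--     while i < n:
--         if i+2< n:
--             poss =  string[i:i+3]
--
--             if poss == str1:
--                 i+=3
--                 continue
--
--         if i+1 < n:
--             poss = string[i: i+2]
--
--             if poss == str2:
--                 i+=2
--                 continue
--
--         poss = string[i]
--
--         if poss == str3:
--             i+=1
--             continue
--
--         return "NO"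
--
--
--     return "YES"
-- ===== SOURCE B (Python) =====
-- def solve(string):
--     run = 0
--     for idx, ch in enumerate(string):
--         if ch == '1':
--             run = 0
--         elif ch == '4':
--             if idx == 0 or run == 2:
--                 return "NO"
--             run += 1
--         else:
--             return "NO"
--     return "YES"
-- ===== Notes on version B (the rewrite author's own statement) =====
-- stated objective: simpler
-- what changed: Replaced the greedy index-jumping tokenizer (slice comparisons against '144'/'14'/'1' with continue/backoff) by a single char-by-char scan keeping a counter of consecutive '4's, rejecting a '4' at position 0 or a third consecutive '4' and any char other than '1'/'4'.
import Mathlib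
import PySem

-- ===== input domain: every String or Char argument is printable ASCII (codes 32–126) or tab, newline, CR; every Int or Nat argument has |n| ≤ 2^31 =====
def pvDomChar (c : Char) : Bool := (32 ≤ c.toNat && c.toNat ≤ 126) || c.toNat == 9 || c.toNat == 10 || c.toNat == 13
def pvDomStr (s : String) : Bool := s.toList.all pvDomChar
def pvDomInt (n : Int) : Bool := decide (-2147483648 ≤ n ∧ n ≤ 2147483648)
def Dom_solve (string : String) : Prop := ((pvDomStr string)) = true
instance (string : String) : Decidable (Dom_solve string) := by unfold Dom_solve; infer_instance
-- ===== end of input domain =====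

-- B replaces A's greedy 144/14/1 tokenizer by a single scan counting consecutive '4's (simpler).

-- ===== PORT A =====
-- A's while loop over index i (always 0 ≤ i, so i : Nat); string[i:i+k] is
-- PySem.List.slice with non-negative bounds, string[i] (i < n in the loop) is pyGet?.
def solveLoopA (cs : List Char) (n : Nat) (i : Nat) : String :=
  if _h : i < n then
    if i + 2 < n ∧ PySem.List.slice cs (some (i : Int)) (some ((i : Int) + 3)) = ['1', '4', '4'] then
      solveLoopA cs n (i + 3)
    else if i + 1 < n ∧ PySem.List.slice cs (some (i : Int)) (some ((i : Int) + 2)) = ['1', '4'] then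
      solveLoopA cs n (i + 2)
    else if PySem.List.pyGet? cs (i : Int) = some '1' then
      solveLoopA cs n (i + 1)
    else "NO"
  else "YES"
termination_by n - i

def solve (string : String) : String :=
  solveLoopA string.toList string.toList.length 0

-- ===== PORT B =====
-- B's for-loop over enumerate(string): idx is the position, run the count of consecutive '4's.
def solveLoopB : List Char → Nat → Nat → String
  | [], _, _ => "YES"
  | c :: t, idx, run =>
    if c = '1' then solveLoopB t (idx + 1) 0
    else if c = '4' then
      if idx = 0 ∨ run = 2 then "NO" else solveLoopB t (idx + 1) (run + 1)
    else "NO"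

def solve_alt (string : String) : String :=
  solveLoopB string.toList 0 0

-- ===== PRECONDITION & SPEC =====
def Spec_solve (string : String) (out : String) : Prop := out = solve_alt string
instance (string : String) (out : String) : Decidable (Spec_solve string out) := by unfold Spec_solve; infer_instance

-- ===== CLAIM (what is proved, stated in full; the proofs are below) =====
def Claim_equal_solve : Prop := ∀ (string : String), Dom_solve string → Spec_solve string (solve string)

-- ===== LEMMAS AND PROOFS =====

-- Invariant relating A's loop head at index i to B's state (idx = i, run = r):
-- either we are at the very start (i = 0, r = 0), or i > 0 and (r = 2, or the
-- next unread character is not '4' — which A's greedy longest match guarantees).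
lemma loopA_eq_loopB (cs : List Char) :
    ∀ k i r, cs.length - i ≤ k → r ≤ 2 →
      ((i = 0 ∧ r = 0) ∨ (0 < i ∧ (r = 2 ∨ ∀ c t, cs.drop i = c :: t → c ≠ '4'))) →
      solveLoopA cs cs.length i = solveLoopB (cs.drop i) i r := by
  intro k
  induction k with
  | zero =>
    intro i r hk _ _
    have hge : cs.length ≤ i := by omega
    rw [solveLoopA, List.drop_eq_nil_of_le hge]
    simp [solveLoopB, Nat.not_lt_of_le hge]
  | succ k ih =>
    intro i r hk hr hinv
    by_cases hlt : i < cs.length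
    · -- the suffix is nonempty
      obtain ⟨c, t, hsuf⟩ : ∃ c t, cs.drop i = c :: t := by
        cases h : cs.drop i with
        | nil => exact absurd (List.drop_eq_nil_iff.mp h) (by omega)
        | cons c t => exact ⟨c, t, rfl⟩
      have hlen : cs.length - i = t.length + 1 := by
        have := congrArg List.length hsuf
        simp [List.length_drop] at this; omega
      have hdrop1 : cs.drop (i + 1) = t := by
        have : cs.drop (i + 1) = (cs.drop i).drop 1 := by
          rw [List.drop_drop]
        simp [this, hsuf]
      have hget : PySem.List.pyGet? cs (i : Int) = some c := by
        rw [show PySem.List.pyGet? cs (i : Int) = cs[i]? from PySem.List.pyGet?_natCast cs i]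
        have : cs[i]? = (cs.drop i).head? := by
          simp [List.head?_drop]
        rw [this, hsuf]; rfl
      have hslice3 : PySem.List.slice cs (some (i : Int)) (some ((i : Int) + 3)) = (c :: t).take 3 := by
        rw [show ((i : Int) + 3) = ((i : Int) + ((3 : Nat) : Int)) by norm_num,
          PySem.List.slice_natCast_add, hsuf]
      have hslice2 : PySem.List.slice cs (some (i : Int)) (some ((i : Int) + 2)) = (c :: t).take 2 := by
        rw [show ((i : Int) + 2) = ((i : Int) + ((2 : Nat) : Int)) by norm_num,
          PySem.List.slice_natCast_add, hsuf]
      rw [solveLoopA, dif_pos hlt, hsuf]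
      by_cases hc1 : c = '1'
      · subst hc1
        -- A tries '144', then '14', then '1'
        cases t with
        | nil =>
          -- only "1" left: A consumes it and ends with YES
          simp only [List.length_nil] at hlen
          have h3 : ¬ (i + 2 < cs.length ∧
              PySem.List.slice cs (some (i : Int)) (some ((i : Int) + 3)) = ['1', '4', '4']) := by
            intro ⟨h, _⟩; omega
          have h2 : ¬ (i + 1 < cs.length ∧
              PySem.List.slice cs (some (i : Int)) (some ((i : Int) + 2)) = ['1', '4']) := by
            intro ⟨h, _⟩; omega
          rw [if_neg h3, if_neg h2, if_pos hget]
          rw [solveLoopA]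
          have : ¬ i + 1 < cs.length := by omega
          rw [dif_neg this]
          simp [solveLoopB]
        | cons d u =>
          by_cases hd4 : d = '4'
          · subst hd4
            cases hu : u with
            | cons e v =>
              rw [hu] at hlen
              simp only [List.length_cons] at hlen
              by_cases he4 : e = '4'
              · -- greedy match "144"
                subst he4
                have h3 : i + 2 < cs.length ∧
                    PySem.List.slice cs (some (i : Int)) (some ((i : Int) + 3)) = ['1', '4', '4'] := by
                  refine ⟨by omega, ?_⟩
                  rw [hslice3]; simp [hu]
                rw [if_pos h3]
                have hdrop3 : cs.drop (i + 3) = v := by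
                  have : cs.drop (i + 3) = (cs.drop i).drop 3 := by rw [List.drop_drop]
                  simp [this, hsuf, hu]
                have := ih (i + 3) 2 (by omega) (by omega)
                  (Or.inr ⟨by omega, Or.inl rfl⟩)
                rw [this, hdrop3]
                simp [solveLoopB]
              · -- match "14": the third char is not '4'
                have h3 : ¬ (i + 2 < cs.length ∧
                    PySem.List.slice cs (some (i : Int)) (some ((i : Int) + 3)) = ['1', '4', '4']) := by
                  intro ⟨_, habs⟩
                  rw [hslice3] at habs; simp [hu] at habs
                  exact he4 habs
                have h2 : i + 1 < cs.length ∧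
                    PySem.List.slice cs (some (i : Int)) (some ((i : Int) + 2)) = ['1', '4'] := by
                  refine ⟨by omega, ?_⟩
                  rw [hslice2]; simp
                rw [if_neg h3, if_pos h2]
                have hdrop2 : cs.drop (i + 2) = u := by
                  have : cs.drop (i + 2) = (cs.drop i).drop 2 := by rw [List.drop_drop]
                  simp [this, hsuf]
                have := ih (i + 2) 1 (by omega) (by omega)
                  (Or.inr ⟨by omega, Or.inr (by
                    intro c' t' h' hc'
                    rw [hdrop2, hu] at h'
                    cases h'; exact he4 hc')⟩)
                rw [this, hdrop2]
                simp [solveLoopB, hu]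
            | nil =>
              -- suffix is exactly "14": A takes "14" and ends
              subst hu
              simp only [List.length_cons, List.length_nil] at hlen
              have h3 : ¬ (i + 2 < cs.length ∧
                  PySem.List.slice cs (some (i : Int)) (some ((i : Int) + 3)) = ['1', '4', '4']) := by
                intro ⟨h, _⟩; omega
              have h2 : i + 1 < cs.length ∧
                  PySem.List.slice cs (some (i : Int)) (some ((i : Int) + 2)) = ['1', '4'] := by
                refine ⟨by omega, ?_⟩
                rw [hslice2]; simp
              rw [if_neg h3, if_pos h2]
              have hdrop2 : cs.drop (i + 2) = [] := by
                have : cs.drop (i + 2) = (cs.drop i).drop 2 := by rw [List.drop_drop]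
                simp [this, hsuf]
              have := ih (i + 2) 1 (by omega) (by omega)
                (Or.inr ⟨by omega, Or.inr (by
                  intro c' t' h' _
                  rw [hdrop2] at h'; cases h')⟩)
              rw [this, hdrop2]
              simp [solveLoopB]
          · -- single "1" token: next char is not '4'
            have h3 : ¬ (i + 2 < cs.length ∧
                PySem.List.slice cs (some (i : Int)) (some ((i : Int) + 3)) = ['1', '4', '4']) := by
              intro ⟨_, habs⟩
              rw [hslice3] at habs
              cases u <;> simp at habs <;> exact hd4 habs.1
            have h2 : ¬ (i + 1 < cs.length ∧
                PySem.List.slice cs (some (i : Int)) (some ((i : Int) + 2)) = ['1', '4']) := by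
              intro ⟨_, habs⟩
              rw [hslice2] at habs; simp at habs
              exact hd4 habs
            rw [if_neg h3, if_neg h2, if_pos hget]
            have := ih (i + 1) 0 (by omega) (by omega)
              (Or.inr ⟨by omega, Or.inr (by
                intro c' t' h' hc'
                rw [hdrop1] at h'; cases h'; exact hd4 hc')⟩)
            rw [this, hdrop1]
            simp [solveLoopB]
      · -- first char is not '1': no token matches, A returns "NO"
        have h3 : ¬ (i + 2 < cs.length ∧
            PySem.List.slice cs (some (i : Int)) (some ((i : Int) + 3)) = ['1', '4', '4']) := by
          intro ⟨_, habs⟩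
          rw [hslice3] at habs
          cases t with
          | nil => simp at habs
          | cons d u => cases u <;> simp at habs <;> exact hc1 habs.1
        have h2 : ¬ (i + 1 < cs.length ∧
            PySem.List.slice cs (some (i : Int)) (some ((i : Int) + 2)) = ['1', '4']) := by
          intro ⟨_, habs⟩
          rw [hslice2] at habs
          cases t <;> simp at habs
          · exact hc1 habs.1
        have h1 : ¬ PySem.List.pyGet? cs (i : Int) = some '1' := by
          rw [hget]; simp; exact fun h => hc1 h
        rw [if_neg h3, if_neg h2, if_neg h1]
        -- B also returns "NO": either c is not '1'/'4', or c = '4' and the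
        -- invariant forces idx = 0 or run = 2
        by_cases hc4 : c = '4'
        · subst hc4
          rcases hinv with ⟨hi0, hr0⟩ | ⟨hi, hr⟩
          · subst hi0; simp [solveLoopB, hc1]
          · rcases hr with hr2 | hno4
            · simp [solveLoopB, hc1, hr2]
            · exact absurd rfl (hno4 _ _ hsuf)
        · simp [solveLoopB, hc1, hc4]
    · -- i ≥ length: suffix empty, both return "YES"
      have hge : cs.length ≤ i := by omega
      rw [solveLoopA, dif_neg hlt, List.drop_eq_nil_of_le hge]
      simp [solveLoopB]

-- ===== VERDICT (by name: the statement is the Claim_ definition above) =====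
theorem solve_spec : Claim_equal_solve := by
  intro string _
  unfold Spec_solve solve solve_alt
  have := loopA_eq_loopB string.toList string.toList.length 0 0
    (by omega) (by omega) (Or.inl ⟨rfl, rfl⟩)
  simpa using this
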